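-- pv_equiv track=rewrite | github.com/youngeun-dev/coding-test-practice | python/과일-장수.py | solution
-- ===== SOURCE A (Python) =====
-- def solution(k, m, score):
--     # 과일 장수가 얻을 수 최대 이익
--     answer = 0
--
--     # 사과의 점수 역순 정렬
--     score = sorted(score, reverse=True)
--
--     for i in range(0, len(score), m): # range(start, end, step)
--         box = score[i:i+m]
--
--         # box의 크기 확인 후 상자의 가격 계산
--         if len(box) == m:
--             answer += min(box) * m
--
--     return answer
-- ===== SOURCE B (Python) =====
-- def solution(k, m, score):
--     # Histogram approach: count each score, walk the distinct scores in
--     # descending order, and for each value add it once per group minimum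
--     # (descending 1-based positions m, 2m, ..., (n//m)*m) that falls inside
--     # that value's run of positions.
--     freq = {}
--     for s in score:
--         freq[s] = freq.get(s, 0) + 1
--     limit = max(len(score) // m, 0) * m  # last position that is a group minimum
--     total = 0
--     seen = 0
--     for v in sorted(freq, reverse=True):
--         hi = min(seen + freq[v], limit)
--         if hi > seen:
--             total += v * (hi // m - seen // m)
--         seen += freq[v]
--     return total * m
-- ===== Notes on version B (the rewrite author's own statement) =====
-- stated objective: alternative
-- what changed: B replaces A's reverse-sort / slice-each-m-box / min() scan by a value histogram: it counts each score into a dict, walks only the distinct scores in descending order, and computes per run arithmetically (via floor divisions) how many group-minimum positions m, 2m, ..., (n//m)*m fall inside that run, so no sorted element list, no slices and no min() scans are built.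
import Mathlib
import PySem

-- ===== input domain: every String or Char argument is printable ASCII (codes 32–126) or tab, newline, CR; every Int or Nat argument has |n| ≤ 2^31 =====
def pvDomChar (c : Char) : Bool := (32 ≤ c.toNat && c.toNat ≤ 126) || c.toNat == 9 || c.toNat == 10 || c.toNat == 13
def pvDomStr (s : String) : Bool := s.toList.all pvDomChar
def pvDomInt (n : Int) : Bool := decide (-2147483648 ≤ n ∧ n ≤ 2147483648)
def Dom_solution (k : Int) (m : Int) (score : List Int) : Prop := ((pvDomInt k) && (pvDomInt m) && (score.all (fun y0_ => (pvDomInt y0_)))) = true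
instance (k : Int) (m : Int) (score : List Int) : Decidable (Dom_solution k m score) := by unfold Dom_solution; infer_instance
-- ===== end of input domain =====

-- B replaces A's reverse-sort / slice-each-box / min() scan by a value histogram:
-- it counts each score once, walks the DISTINCT scores in descending order, and adds
-- each value once per group-minimum position (m, 2m, …, (n//m)*m) inside its run.

-- ===== PORT A =====
-- the for-loop of A over range(0, len(score'), m), on the already reverse-sorted list
def solutionLoop (m : Int) (score' : List Int) : Int :=
  (PySem.List.pyRange 0 (score'.length : Int) m).foldl
    (fun answer i =>
      let box := PySem.List.slice score' (some i) (some (i + m))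
      if (box.length : Int) = m then
        match PySem.List.min? box (fun x => x) with
        | some v => answer + v * m
        | none => answer   -- unreachable totality guard: under Pre_ m ≠ 0, the guard gives box ≠ []
      else answer) 0

def solution (k : Int) (m : Int) (score : List Int) : Int :=
  solutionLoop m (PySem.List.sorted score (fun x => x) true)

-- ===== PORT B =====
def solution_alt (k : Int) (m : Int) (score : List Int) : Int :=
  -- freq = {}; for s in score: freq[s] = freq.get(s, 0) + 1
  let freq := score.foldl (fun d s => d.insert s (d.getD s 0 + 1)) PySem.Dict.empty
  -- limit = max(len(score) // m, 0) * m
  let limit := max (PySem.Int.floordiv (score.length : Int) m) 0 * m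
  -- total = 0; seen = 0; for v in sorted(freq, reverse=True): …   (state p = (total, seen))
  let r := (PySem.List.sorted freq.keys (fun x => x) true).foldl
      (fun (p : Int × Int) v =>
        let hi := min (p.2 + freq.getD v 0) limit
        (if p.2 < hi then
           p.1 + v * (PySem.Int.floordiv hi m - PySem.Int.floordiv p.2 m)
         else p.1,
         p.2 + freq.getD v 0)) (0, 0)
  r.1 * m

-- ===== PRECONDITION & SPEC =====
-- Pre_ excludes exactly m = 0, where Python A raises ValueError (range step 0)
-- and Python B raises ZeroDivisionError.
def Pre_solution (k : Int) (m : Int) (score : List Int) : Prop := m ≠ 0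
instance (k : Int) (m : Int) (score : List Int) : Decidable (Pre_solution k m score) := by unfold Pre_solution; infer_instance
def pvWitness_solution : Int × Int × List Int := (0, 2, [3, 1, 4, 1, 5])

def Spec_solution (k : Int) (m : Int) (score : List Int) (out : Int) : Prop := out = solution_alt k m score
instance (k : Int) (m : Int) (score : List Int) (out : Int) : Decidable (Spec_solution k m score out) := by unfold Spec_solution; infer_instance

-- ===== CLAIM (what is proved, stated in full; the proofs are below) =====
def Claim_equal_solution : Prop := ∀ (k : Int) (m : Int) (score : List Int), Dom_solution k m score → Pre_solution k m score → Spec_solution k m score (solution k m score)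

-- ===== LEMMAS AND PROOFS =====

-- descending sort of an Int list is the reverse of its ascending sort
lemma sorted_rev_eq_reverse (xs : List Int) :
    PySem.List.sorted xs (fun x => x) true = (PySem.List.sorted xs (fun x => x) false).reverse := by
  apply List.eq_of_perm_of_sorted (le := fun a b => b ≤ a)
  · intro a b _ _ h1 h2; exact le_antisymm h2 h1
  · exact PySem.List.sorted_pairwise_rev xs (fun x => x)
  · exact (List.pairwise_reverse).mpr (by simpa using PySem.List.sorted_pairwise xs (fun x => x))
  · exact ((PySem.List.sorted_perm xs _ true).trans
      ((PySem.List.sorted_perm xs _ false).symm)).trans (List.reverse_perm _).symm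

-- ===== negative m: both sides return 0 =====

lemma solutionLoop_neg (m : Int) (s : List Int) (hm : m < 0) : solutionLoop m s = 0 := by
  unfold solutionLoop
  rw [show (PySem.List.pyRange 0 (s.length : Int) m) = [] by
    simp [PySem.List.pyRange, hm.ne, not_lt.mpr hm.le]]
  rfl

-- B's fold adds nothing when limit = 0 and all counts are nonnegative
lemma altFold_neg (freq : PySem.Dict Int Int) (hc : ∀ v, 0 ≤ freq.getD v 0) (m : Int) :
    ∀ (ks : List Int) (t s : Int), 0 ≤ s →
      (ks.foldl
        (fun (p : Int × Int) v =>
          let hi := min (p.2 + freq.getD v 0) 0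
          (if p.2 < hi then
             p.1 + v * (PySem.Int.floordiv hi m - PySem.Int.floordiv p.2 m)
           else p.1,
           p.2 + freq.getD v 0)) (t, s)).1 = t := by
  intro ks
  induction ks with
  | nil => intro t s _; rfl
  | cons v rest ih =>
    intro t s hs
    have hguard : ¬ s < min (s + freq.getD v 0) 0 := by
      have := min_le_right (s + freq.getD v 0) 0
      omega
    simp only [List.foldl_cons, if_neg hguard]
    exact ih t (s + freq.getD v 0) (by have := hc v; omega)

lemma floordiv_nonpos_of_neg (n : Nat) (m : Int) (hm : m < 0) :
    PySem.Int.floordiv (n : Int) m ≤ 0 := by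
  have h1 := PySem.Int.floordiv_mul_add_mod (n : Int) m
  have h2 := PySem.Int.mod_neg_bounds (n : Int) hm
  by_contra hf
  push_neg at hf
  have hnn : (0:Int) ≤ (n : Int) := Int.natCast_nonneg _
  nlinarith [mul_pos hf (neg_pos.mpr hm)]

lemma solution_eq_alt_of_neg (k m : Int) (score : List Int) (hm : m < 0) :
    solution k m score = solution_alt k m score := by
  have hA : solution k m score = 0 := solutionLoop_neg m _ hm
  have hlim : max (PySem.Int.floordiv (score.length : Int) m) 0 * m = 0 := by
    rw [max_eq_right (floordiv_nonpos_of_neg score.length m hm), zero_mul]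
  have hB : solution_alt k m score = 0 := by
    show ((PySem.List.sorted _ (fun x => x) true).foldl _ (0, 0)).1 * m = 0
    rw [show ((0 : Int), (0 : Int)) = ((0 : Int), (0 : Int)) from rfl]
    rw [PySem.Dict.foldl_insert_getD_add_one_eq_counter score]
    have := altFold_neg (PySem.Dict.counter score)
      (fun v => by rw [PySem.Dict.getD_counter]; exact Int.natCast_nonneg _) m
      (PySem.List.sorted (PySem.Dict.counter score).keys (fun x => x) true) 0 0 le_rfl
    simp only [hlim] at *
    rw [this, zero_mul]
  rw [hA, hB]

-- ===== positive m =====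

-- A's loop on the reverse of an ascending-sorted list is the sum of the group minima
-- (extracted, step for step, from A's range/slice/min structure)
lemma solutionLoop_eq_sum (M : Nat) (hM : 0 < M) (u : List Int)
    (hmono : ∀ p q : Nat, p ≤ q → q < u.length → u.getD p 0 ≤ u.getD q 0) :
    solutionLoop (M : Int) u.reverse
      = ((List.range (u.length / M)).map
          (fun g => u.getD (u.length - (g + 1) * M) 0 * (M : Int))).sum := by
  have hm : (0 : Int) < (M : Int) := by exact_mod_cast hM
  set N := u.length with hN
  set q := N / M with hq
  have hqM : q * M ≤ N := Nat.div_mul_le_self N M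
  have hdivle : ∀ a : Nat, a * M ≤ N → a ≤ q := fun a ha => (Nat.le_div_iff_mul_le hM).mpr ha
  set G : Nat → Int := fun g => u.getD (N - (g + 1) * M) 0 with hG
  unfold solutionLoop
  rw [List.length_reverse, PySem.List.pyRange_of_pos _ _ hm]
  have hC : (if (0:Int) < (N:Int) then (((N:Int) - 0 + (M:Int) - 1)/(M:Int)).toNat else 0)
      = (N + M - 1)/M := by
    split
    · rw [show ((N:Int) - 0 + (M:Int) - 1) = ((N + M - 1 : Nat) : Int) by push_cast; omega,
        Int.ofNat_ediv_ofNat, Int.toNat_natCast]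
    · next h =>
      have hN0 : N = 0 := by omega
      rw [hN0, Nat.div_eq_of_lt (by omega)]
  rw [hC, List.foldl_map]
  have hbody : ∀ (a : Int) (g : Nat),
      (fun answer i =>
        let box := PySem.List.slice u.reverse (some i) (some (i + (M:Int)))
        if (box.length : Int) = (M:Int) then
          match PySem.List.min? box (fun x => x) with
          | some v => answer + v * (M:Int)
          | none => answer
        else answer) a ((0:Int) + (M:Int) * (g:Int))
      = a + (if (g+1)*M ≤ N then G g * (M:Int) else 0) := by
    intro a g
    have hexp : (g+1)*M = M*g + M := by ring
    dsimp only
    rw [show (0:Int) + (M:Int) * (g:Int) = ((M*g : Nat) : Int) by push_cast; ring,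
      PySem.List.slice_natCast_add u.reverse (M*g) M]
    set box := List.take M (List.drop (M*g) u.reverse) with hbox
    have hlen : box.length = min M (N - M*g) := by
      rw [hbox, List.length_take, List.length_drop, List.length_reverse, ← hN]
    by_cases hfull : M*g + M ≤ N
    · have hlenM : box.length = M := by omega
      rw [if_pos (by rw [hlenM] : (box.length : Int) = (M:Int)),
        if_pos (show (g+1)*M ≤ N by omega)]
      have hidxlt : N - (g+1)*M < N := by omega
      cases hminv : PySem.List.min? box (fun x => x) with
      | none =>
        exact absurd ((PySem.List.min?_eq_none_iff box _).mp hminv)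
          (by intro h; rw [h] at hlenM; simp at hlenM; omega)
      | some v =>
        have hvm := PySem.List.min?_mem hminv
        have hvmin := PySem.List.min?_isMin hminv
        have hv : v = G g := by
          have hM1 : M - 1 < box.length := by omega
          have hb1 : box[M-1]'hM1 = u[N - (g+1)*M]'hidxlt := by
            simp only [hbox, List.getElem_take, List.getElem_drop, List.getElem_reverse]
            exact getElem_congr (rfl : u = u) (by omega) (by omega)
          have h1 : v ≤ u[N - (g+1)*M]'hidxlt := by
            have hmem : box[M-1]'hM1 ∈ box := List.getElem_mem _
            rw [hb1] at hmem
            exact hvmin _ hmem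
          have h2 : u[N - (g+1)*M]'hidxlt ≤ v := by
            obtain ⟨p, hp, hpv⟩ := List.mem_iff_getElem.mp hvm
            have hplt : p < M := by omega
            have hd : N - 1 - (M*g + p) < N := by omega
            have hbp : box[p]'hp = u[N - 1 - (M*g + p)]'hd := by
              simp only [hbox, List.getElem_take, List.getElem_drop, List.getElem_reverse]
              exact getElem_congr (rfl : u = u) (by omega) (by omega)
            have hmo := hmono (N - (g+1)*M) (N - 1 - (M*g + p)) (by omega) hd
            rw [List.getD_eq_getElem u 0 hidxlt, List.getD_eq_getElem u 0 hd] at hmo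
            rw [← hpv, hbp]
            exact hmo
          rw [hG]
          dsimp only
          rw [List.getD_eq_getElem u 0 hidxlt]
          exact le_antisymm h1 h2
        rw [hv]
    · have hlenlt : box.length < M := by omega
      rw [if_neg (by exact_mod_cast Nat.ne_of_lt hlenlt : ¬ ((box.length : Int) = (M:Int))),
        if_neg (show ¬ ((g+1)*M ≤ N) by omega), add_zero]
  rw [funext fun a => funext fun g => hbody a g, PySem.List.foldl_add, zero_add]
  have hqC : q ≤ (N + M - 1)/M := Nat.div_le_div_right (by omega)
  rw [show (N + M - 1)/M = q + ((N + M - 1)/M - q) by omega, List.range_add,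
    List.map_append, List.sum_append]
  have hzero : ((List.map (fun x => q + x) (List.range ((N + M - 1)/M - q))).map
      (fun g => if (g+1)*M ≤ N then G g * (M:Int) else 0)).sum = 0 := by
    rw [List.map_map]
    apply List.sum_eq_zero
    intro x hx
    simp only [List.mem_map, Function.comp] at hx
    obtain ⟨y, _, rfl⟩ := hx
    have hno : ¬ ((q + y + 1) * M ≤ N) := by
      intro hle
      have h1 : (q + 1) * M ≤ (q + y + 1) * M := Nat.mul_le_mul_right M (by omega)
      have h2 := hdivle (q + 1) (by omega)
      omega
    simp [hno]
  rw [hzero, add_zero]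
  apply congrArg
  apply List.map_congr_left
  intro g hg
  rw [List.mem_range] at hg
  rw [if_pos]
  have h1 : (g + 1) * M ≤ q * M := Nat.mul_le_mul_right M (by omega)
  omega

-- a flatMap of constant runs over a strictly descending key list is descending
lemma runs_pairwise (c : Int → Nat) :
    ∀ (ks : List Int), ks.Pairwise (fun a b => b < a) →
      (ks.flatMap (fun v => List.replicate (c v) v)).Pairwise (fun a b : Int => b ≤ a) := by
  intro ks
  induction ks with
  | nil => intro _; simp
  | cons v rest ih =>
    intro h
    rw [List.pairwise_cons] at h
    rw [List.flatMap_cons, List.pairwise_append]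
    refine ⟨List.pairwise_replicate.mpr (Or.inr le_rfl), ih h.2, ?_⟩
    intro a ha b hb
    rw [List.eq_of_mem_replicate ha]
    rw [List.mem_flatMap] at hb
    obtain ⟨w, hw, hbw⟩ := hb
    rw [List.eq_of_mem_replicate hbw]
    exact (h.1 w hw).le

-- counting elements of a flatMap of constant runs, keys distinct
lemma count_runs (c : Int → Nat) (x : Int) :
    ∀ (ks : List Int), ks.Nodup →
      (ks.flatMap (fun v => List.replicate (c v) v)).count x = if x ∈ ks then c x else 0 := by
  intro ks
  induction ks with
  | nil => intro _; simp
  | cons v rest ih =>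
    intro hnd
    rw [List.nodup_cons] at hnd
    rw [List.flatMap_cons, List.count_append, List.count_replicate, ih hnd.2]
    by_cases hxv : x = v
    · subst hxv
      simp [hnd.1]
    · have hvx : ¬ v = x := fun h => hxv h.symm
      by_cases hxr : x ∈ rest
      · simp [hxv, hxr, hvx]
      · simp [hxv, hxr, hvx]

-- the descending sort of score is the concatenation of the runs of its distinct
-- values, taken in descending order with their multiplicities
lemma desc_decomp (score : List Int) :
    PySem.List.sorted score (fun x => x) true
      = (PySem.List.sorted (PySem.Set.ofList score) (fun x => x) true).flatMap
          (fun v => List.replicate (score.count v) v) := by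
  set ks := PySem.List.sorted (PySem.Set.ofList score) (fun x => x) true with hks
  have hperm : ks.Perm (PySem.Set.ofList score) := PySem.List.sorted_perm _ _ _
  have hnd : ks.Nodup := hperm.symm.nodup (PySem.Set.nodup_ofList score)
  have hgt : ks.Pairwise (fun a b => b < a) := by
    have h1 : ks.Pairwise (fun a b : Int => b ≤ a) := PySem.List.sorted_pairwise_rev _ _
    have h2 : ks.Pairwise (fun a b : Int => a ≠ b) := hnd
    exact (h1.and h2).imp (fun {a b} h => lt_of_le_of_ne h.1 (Ne.symm h.2))
  apply List.eq_of_perm_of_sorted (le := fun a b : Int => b ≤ a)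
  · intro a b _ _ h1 h2; exact le_antisymm h2 h1
  · exact PySem.List.sorted_pairwise_rev score (fun x => x)
  · exact runs_pairwise _ ks hgt
  · rw [List.perm_iff_count]
    intro x
    rw [(PySem.List.sorted_perm score (fun x => x) true).count_eq,
      count_runs (fun v => score.count v) x ks hnd]
    by_cases hx : x ∈ score
    · rw [if_pos (by rw [hks, PySem.List.mem_sorted, PySem.Set.mem_ofList]; exact hx)]
    · rw [if_neg (by rw [hks, PySem.List.mem_sorted, PySem.Set.mem_ofList]; exact hx),
        List.count_eq_zero.mpr hx]

-- list-range sums as Finset.range sums (bridge between A's foldl sum and B's minima sum)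
lemma sum_map_range_eq (q : Nat) (f : Nat → Int) :
    ((List.range q).map f).sum = ∑ g ∈ Finset.range q, f g := by
  induction q with
  | zero => simp
  | succ n ih =>
    rw [List.range_succ, List.map_append, List.sum_append, Finset.sum_range_succ, ih]
    simp

-- guarded step value of B: always "+ v * (number of group minima inside this run)"
lemma step_value (M : Nat) (hM : 0 < M) (t0 v : Int) (s0 hi' : Nat) :
    (if (s0 : Int) < (hi' : Int) then
       t0 + v * (PySem.Int.floordiv (hi' : Int) (M : Int) - PySem.Int.floordiv (s0 : Int) (M : Int))
     else t0)
    = t0 + v * ((hi' / M - s0 / M : Nat) : Int) := by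
  rw [PySem.Int.floordiv_natCast, PySem.Int.floordiv_natCast]
  by_cases h : s0 < hi'
  · rw [if_pos (by exact_mod_cast h)]
    have hle : s0 / M ≤ hi' / M := Nat.div_le_div_right h.le
    congr 1
    congr 1
    omega
  · rw [if_neg (by exact_mod_cast h)]
    have hle : hi' / M ≤ s0 / M := Nat.div_le_div_right (by omega)
    rw [show hi' / M - s0 / M = 0 by omega]
    simp

-- the number of group minima positions (multiples of M in (s0, s0 + c] capped at q*M)
lemma count_minima (M q : Nat) (hM : 0 < M) (s0 c : Nat) (v : Int) :
    (∑ g ∈ Finset.range q, if s0 < (g + 1) * M ∧ (g + 1) * M ≤ s0 + c then v else 0)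
      = v * ((min (s0 + c) (q * M) / M - s0 / M : Nat) : Int) := by
  set b := min (s0 + c) (q * M) / M with hb
  have hbq : b ≤ q := by
    have h1 : min (s0 + c) (q * M) / M ≤ (q * M) / M := Nat.div_le_div_right (min_le_right _ _)
    rw [Nat.mul_div_cancel q hM] at h1
    exact h1
  have hcong : ∀ g ∈ Finset.range q,
      (if s0 < (g + 1) * M ∧ (g + 1) * M ≤ s0 + c then v else 0)
        = (if g ∈ Finset.Ico (s0 / M) b then v else 0) := by
    intro g hg
    rw [Finset.mem_range] at hg
    congr 1
    rw [Finset.mem_Ico, eq_iff_iff]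
    constructor
    · rintro ⟨h1, h2⟩
      refine ⟨?_, ?_⟩
      · have := (Nat.div_lt_iff_lt_mul hM).mpr h1
        omega
      · have hmin : (g + 1) * M ≤ min (s0 + c) (q * M) :=
          le_min h2 (Nat.mul_le_mul_right M (by omega))
        have := (Nat.le_div_iff_mul_le hM).mpr hmin
        omega
    · rintro ⟨h1, h2⟩
      have ha : s0 / M < g + 1 := by omega
      have hlt := (Nat.div_lt_iff_lt_mul hM).mp ha
      have hle := (Nat.le_div_iff_mul_le hM).mp (show g + 1 ≤ b by omega)
      exact ⟨hlt, le_trans hle (min_le_left _ _)⟩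
  rw [Finset.sum_congr rfl hcong, Finset.sum_ite_mem,
    Finset.inter_eq_right.mpr (fun g hg => by
      rw [Finset.mem_Ico] at hg; rw [Finset.mem_range]; omega),
    Finset.sum_const, Nat.card_Ico, nsmul_eq_mul, mul_comm]

-- the descending positions (g+1)*M - 1 (g < q) that fall in w's index window (s0, s0+|w|]
def minimaSum (M q s0 : Nat) (w : List Int) : Int :=
  ∑ g ∈ Finset.range q,
    if s0 < (g + 1) * M ∧ (g + 1) * M ≤ s0 + w.length
    then w.getD ((g + 1) * M - 1 - s0) 0 else 0

-- B's fold over the distinct values computes exactly the minima sum of the run list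
lemma fold_runs (M q : Nat) (hM : 0 < M) (cnt : Int → Nat) :
    ∀ (ks : List Int) (s0 : Nat) (t0 : Int),
      ks.foldl
        (fun (p : Int × Int) v =>
          let hi := min (p.2 + ((cnt v : Nat) : Int)) ((q * M : Nat) : Int)
          (if p.2 < hi then
             p.1 + v * (PySem.Int.floordiv hi (M : Int) - PySem.Int.floordiv p.2 (M : Int))
           else p.1,
           p.2 + ((cnt v : Nat) : Int))) (t0, (s0 : Int))
      = (t0 + minimaSum M q s0 (ks.flatMap (fun v => List.replicate (cnt v) v)),
         ((s0 + (ks.map cnt).sum : Nat) : Int)) := by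
  intro ks
  induction ks with
  | nil =>
    intro s0 t0
    simp only [List.foldl_nil, List.flatMap_nil, List.map_nil, List.sum_nil, Nat.add_zero]
    rw [minimaSum, Finset.sum_eq_zero (fun g _ => by
      rw [if_neg]; rintro ⟨h1, h2⟩; simp at h2; omega)]
    rw [add_zero]
  | cons v rest ih =>
    intro s0 t0
    rw [List.foldl_cons]
    have hmin : min ((s0 : Int) + ((cnt v : Nat) : Int)) ((q * M : Nat) : Int)
        = ((min (s0 + cnt v) (q * M) : Nat) : Int) := by push_cast; rfl
    simp only [hmin]
    rw [step_value M hM t0 v s0 (min (s0 + cnt v) (q * M)),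
      show (s0 : Int) + ((cnt v : Nat) : Int) = ((s0 + cnt v : Nat) : Int) by push_cast; rfl,
      ih (s0 + cnt v) _]
    rw [Prod.mk.injEq]
    refine ⟨?_, by rw [List.map_cons, List.sum_cons]; congr 1; omega⟩
    -- first components
    rw [add_assoc]
    congr 1
    -- v * (count of minima in this run) + minimaSum from s0+c = minimaSum from s0 of run ++ rest
    rw [List.flatMap_cons]
    set c := cnt v with hc
    set w' := rest.flatMap (fun u => List.replicate (cnt u) u) with hw'
    have hsplit : ∀ g ∈ Finset.range q,
        (if s0 < (g + 1) * M ∧ (g + 1) * M ≤ s0 + (List.replicate c v ++ w').length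
         then (List.replicate c v ++ w').getD ((g + 1) * M - 1 - s0) 0 else 0)
        = (if s0 < (g + 1) * M ∧ (g + 1) * M ≤ s0 + c then v else 0)
          + (if s0 + c < (g + 1) * M ∧ (g + 1) * M ≤ (s0 + c) + w'.length
             then w'.getD ((g + 1) * M - 1 - (s0 + c)) 0 else 0) := by
      intro g _
      rw [List.length_append, List.length_replicate]
      by_cases h0 : s0 < (g + 1) * M
      · by_cases h1 : (g + 1) * M ≤ s0 + c
        · rw [if_pos ⟨h0, by omega⟩, if_pos ⟨h0, h1⟩, if_neg (by omega), add_zero]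
          have hidx : (g + 1) * M - 1 - s0 < (List.replicate c v : List Int).length := by
            rw [List.length_replicate]; omega
          rw [List.getD_append _ _ _ _ hidx, List.getD_eq_getElem _ _ hidx,
            List.getElem_replicate]
        · by_cases h2 : (g + 1) * M ≤ s0 + (c + w'.length)
          · rw [if_pos ⟨h0, h2⟩, if_neg (by omega), if_pos ⟨by omega, by omega⟩, zero_add]
            have hge : (List.replicate c v : List Int).length ≤ (g + 1) * M - 1 - s0 := by
              rw [List.length_replicate]; omega
            rw [List.getD_append_right _ _ _ _ hge, List.length_replicate,
              show (g + 1) * M - 1 - s0 - c = (g + 1) * M - 1 - (s0 + c) by omega]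
          · rw [if_neg (by omega), if_neg (by omega), if_neg (by omega), add_zero]
      · rw [if_neg (by omega), if_neg (by omega), if_neg (by omega), add_zero]
    simp only [minimaSum]
    rw [Finset.sum_congr rfl hsplit, Finset.sum_add_distrib,
      count_minima M q hM s0 c v]

-- reading a group minimum off the descending list = reading it off the ascending list
lemma getD_desc_asc (u : List Int) (i : Nat) (hi : i < u.length) :
    u.reverse.getD i 0 = u.getD (u.length - 1 - i) 0 := by
  have h1 : i < u.reverse.length := by rw [List.length_reverse]; exact hi
  rw [List.getD_eq_getElem _ _ h1, List.getD_eq_getElem _ _ (by omega), List.getElem_reverse]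

lemma solution_eq_alt_of_pos (k m : Int) (score : List Int) (hm : 0 < m) :
    solution k m score = solution_alt k m score := by
  obtain ⟨M, rfl⟩ : ∃ M : Nat, m = (M : Int) := ⟨m.toNat, (Int.toNat_of_nonneg hm.le).symm⟩
  have hM : 0 < M := by exact_mod_cast hm
  set u := PySem.List.sorted score (fun x => x) false with hu
  have hmono : ∀ p q : Nat, p ≤ q → q < u.length → u.getD p 0 ≤ u.getD q 0 := by
    intro p q hpq hq
    rw [List.getD_eq_getElem _ 0 (lt_of_le_of_lt hpq hq), List.getD_eq_getElem _ 0 hq]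
    exact PySem.List.sorted_id_getElem_mono score hpq hq
  set N := u.length with hN
  have hNs : score.length = N := by rw [hN, hu, PySem.List.length_sorted]
  set q := N / M with hq
  have hqM : q * M ≤ N := Nat.div_mul_le_self N M
  -- ===== A side =====
  have hA : solution k (M : Int) score
      = ∑ g ∈ Finset.range q, u.getD (N - (g + 1) * M) 0 * (M : Int) := by
    show solutionLoop (M : Int) (PySem.List.sorted score (fun x => x) true) = _
    rw [sorted_rev_eq_reverse score, ← hu, solutionLoop_eq_sum M hM u hmono, ← hN, ← hq,
      sum_map_range_eq]
  -- ===== B side =====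
  have hB : solution_alt k (M : Int) score
      = (∑ g ∈ Finset.range q, u.reverse.getD ((g + 1) * M - 1) 0) * (M : Int) := by
    show ((PySem.List.sorted _ (fun x => x) true).foldl _ ((0 : Int), (0 : Int))).1 * (M:Int) = _
    rw [PySem.Dict.foldl_insert_getD_add_one_eq_counter score]
    have hlim : max (PySem.Int.floordiv (score.length : Int) (M : Int)) 0 * (M : Int)
        = ((q * M : Nat) : Int) := by
      rw [hNs, PySem.Int.floordiv_natCast, ← hq,
        max_eq_left (Int.natCast_nonneg q)]
      push_cast; ring
    simp only [hlim, PySem.Dict.getD_counter, PySem.Dict.keys_counter]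
    rw [show ((0 : Int), (0 : Int)) = ((0 : Int), ((0 : Nat) : Int)) by norm_num]
    rw [fold_runs M q hM (fun v => score.count v)
      (PySem.List.sorted (PySem.Set.ofList score) (fun x => x) true) 0 0]
    rw [← desc_decomp score, sorted_rev_eq_reverse score, ← hu]
    dsimp only
    rw [zero_add]
    congr 1
    simp only [minimaSum]
    apply Finset.sum_congr rfl
    intro g hg
    rw [Finset.mem_range] at hg
    have hle : (g + 1) * M ≤ N := le_trans (Nat.mul_le_mul (by omega) (le_refl M)) hqM
    rw [if_pos ⟨Nat.mul_pos (Nat.succ_pos g) hM,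
      by rw [List.length_reverse, ← hN]; omega⟩, Nat.sub_zero]
  rw [hA, hB, Finset.sum_mul]
  apply Finset.sum_congr rfl
  intro g hg
  rw [Finset.mem_range] at hg
  have hle : (g + 1) * M ≤ N := le_trans (Nat.mul_le_mul (by omega) (le_refl M)) hqM
  have hMpos : 0 < (g + 1) * M := Nat.mul_pos (Nat.succ_pos g) hM
  rw [getD_desc_asc u _ (by rw [← hN]; omega), ← hN,
    show N - 1 - ((g + 1) * M - 1) = N - (g + 1) * M by omega]

-- ===== VERDICT (by name: the statement is the Claim_ definition above) =====
theorem solution_spec : Claim_equal_solution := by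
  intro k m score _ hm
  unfold Spec_solution
  rcases lt_or_gt_of_ne (hm : m ≠ 0) with h | h
  · exact solution_eq_alt_of_neg k m score h
  · exact solution_eq_alt_of_pos k m score h
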